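-- pv_equiv track=rewrite | github.com/X1coSantos/ProgramacaoComPythonEx | listasExercicios.py | desincripta_pares_impares
-- ===== SOURCE A (Python) =====
-- def desincripta_pares_impares(texto_incriptado):
--     """ Desincripta texto incriptado da forma dos pares e impares """
--
--     tam = len(texto_incriptado)
--     final = ""
--
--     if tam % 2 == 0:
--         metade = tam // 2
--     else:
--         metade = tam // 2 + 1
--
--     pares = texto_incriptado[0:metade:1]
--     impares = texto_incriptado[metade:tam:1]
--
--     for i in range(0, len(impares)):
--         final += pares[i] + impares[i]
--
--     if tam % 2 != 0: final += pares[-1]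
--     return final
-- ===== SOURCE B (Python) =====
-- def desincripta_pares_impares(texto_incriptado):
--     """Same de-interleave via strided slice-assignment scatter instead of an index loop."""
--     tam = len(texto_incriptado)
--     metade = (tam + 1) // 2
--     pares = texto_incriptado[:metade]
--     impares = texto_incriptado[metade:]
--     res = [''] * tam
--     res[0::2] = pares
--     res[1::2] = impares
--     return ''.join(res)
-- ===== Notes on version B (the rewrite author's own statement) =====
-- stated objective: simpler
-- what changed: Replaces the index loop (with its odd-length tail special case) by a strided slice-assignment scatter res[0::2]=pares, res[1::2]=impares joined once; the Lean port is a single map over output positions.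
import Mathlib
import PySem

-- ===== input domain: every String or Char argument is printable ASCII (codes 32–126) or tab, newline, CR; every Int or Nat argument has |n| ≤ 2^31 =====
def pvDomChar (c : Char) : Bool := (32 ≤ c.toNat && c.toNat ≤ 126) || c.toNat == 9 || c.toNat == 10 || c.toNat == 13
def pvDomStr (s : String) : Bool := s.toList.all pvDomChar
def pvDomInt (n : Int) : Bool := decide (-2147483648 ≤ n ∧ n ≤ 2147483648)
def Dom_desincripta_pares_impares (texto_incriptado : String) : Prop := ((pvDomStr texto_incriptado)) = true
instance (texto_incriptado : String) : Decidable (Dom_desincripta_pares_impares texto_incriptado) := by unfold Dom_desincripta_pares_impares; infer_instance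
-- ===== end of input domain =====

-- B replaces A's interleaving index loop (and its odd-length tail append) by a strided
-- slice-assignment scatter followed by one join; equivalence is proved for every string.

-- ===== PORT A =====
def desincripta_pares_impares (texto_incriptado : String) : String :=
  let l := texto_incriptado.toList
  let tam : Int := PySem.Str.len texto_incriptado
  let metade : Int :=
    if PySem.Int.mod tam 2 = 0 then PySem.Int.floordiv tam 2
    else PySem.Int.floordiv tam 2 + 1
  -- texto[0:metade:1] / texto[metade:tam:1]: step-1 slices, exactly PySem.List.slice
  let pares := PySem.List.slice l (some 0) (some metade)
  let impares := PySem.List.slice l (some metade) (some tam)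
  let final := (PySem.List.pyRange 0 (impares.length : Int) 1).foldl
      (fun acc i => acc ++ [PySem.List.pyGetD pares i 'A', PySem.List.pyGetD impares i 'A']) []
  let final := if PySem.Int.mod tam 2 ≠ 0 then final ++ [PySem.List.pyGetD pares (-1) 'A'] else final
  String.ofList final

-- ===== PORT B =====
def desincripta_pares_impares_alt (texto_incriptado : String) : String :=
  let l := texto_incriptado.toList
  let tam := l.length
  let metade := (tam + 1) / 2
  let pares := l.take metade
  let impares := l.drop metade
  -- res = ['']*tam; res[0::2] = pares; res[1::2] = impares; ''.join(res):
  -- output position i receives pares[i/2] if i is even, impares[i/2] if i is odd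
  String.ofList ((List.range tam).map (fun i =>
    if i % 2 = 0 then pares.getD (i / 2) 'A' else impares.getD (i / 2) 'A'))

-- ===== PRECONDITION & SPEC =====
def Spec_desincripta_pares_impares (texto_incriptado : String) (out : String) : Prop := out = desincripta_pares_impares_alt texto_incriptado
instance (texto_incriptado : String) (out : String) : Decidable (Spec_desincripta_pares_impares texto_incriptado out) := by unfold Spec_desincripta_pares_impares; infer_instance

-- ===== CLAIM (what is proved, stated in full; the proofs are below) =====
def Claim_equal_desincripta_pares_impares : Prop := ∀ (texto_incriptado : String), Dom_desincripta_pares_impares texto_incriptado → Spec_desincripta_pares_impares texto_incriptado (desincripta_pares_impares texto_incriptado)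

-- ===== LEMMAS AND PROOFS =====

theorem pv_range_add_two (k : ℕ) :
    List.range (k + 2) = 0 :: 1 :: (List.range k).map (· + 2) := by
  rw [List.range_succ_eq_map, List.range_succ_eq_map, List.map_cons, List.map_map]
  rfl

-- the heart of the equivalence: A's pairwise loop plus its odd tail = B's position map
theorem pv_main (p q : List Char) (hq : p.length = q.length ∨ p.length = q.length + 1) :
    (List.range q.length).flatMap (fun i => [p.getD i 'A', q.getD i 'A']) ++
      (if p.length = q.length + 1 then [p.getD (p.length - 1) 'A'] else []) =
    (List.range (p.length + q.length)).map (fun i =>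
      if i % 2 = 0 then p.getD (i / 2) 'A' else q.getD (i / 2) 'A') := by
  induction q generalizing p with
  | nil =>
    rcases hq with h | h
    · rcases List.length_eq_zero_iff.mp h with rfl
      simp
    · rcases p with _ | ⟨x, p'⟩
      · simp at h
      · have h0 : p'.length = 0 := by simpa using h
        rcases List.length_eq_zero_iff.mp h0 with rfl
        simp
  | cons y q' ih =>
    rcases p with _ | ⟨x, p'⟩
    · simp at hq
    · have hq' : p'.length = q'.length ∨ p'.length = q'.length + 1 := by
        simp at hq; omega
      have ihp := ih p' hq'
      have lhs1 : (List.range (y :: q').length).flatMap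
            (fun i => [(x :: p').getD i 'A', (y :: q').getD i 'A'])
          = [x, y] ++ (List.range q'.length).flatMap (fun i => [p'.getD i 'A', q'.getD i 'A']) := by
        rw [List.length_cons, List.range_succ_eq_map, List.flatMap_cons, List.flatMap_map]
        simp
      have htail : (if (x :: p').length = (y :: q').length + 1
              then [(x :: p').getD ((x :: p').length - 1) 'A'] else [])
          = (if p'.length = q'.length + 1 then [p'.getD (p'.length - 1) 'A'] else []) := by
        by_cases h : p'.length = q'.length + 1
        · have h1 : (x :: p').length = (y :: q').length + 1 := by simp [h]
          simp only [h, h1, if_pos]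
          have h2 : (y :: q').length + 1 - 1 = q'.length + 1 := by simp
          rw [h2, List.getD_cons_succ]
          have h3 : q'.length + 1 - 1 = q'.length := by omega
          rw [h3]
        · have h1 : ¬ (x :: p').length = (y :: q').length + 1 := by simp [h]
          simp [h]
      have rhs1 : (List.range ((x :: p').length + (y :: q').length)).map (fun i =>
            if i % 2 = 0 then (x :: p').getD (i / 2) 'A' else (y :: q').getD (i / 2) 'A')
          = [x, y] ++ (List.range (p'.length + q'.length)).map (fun i =>
              if i % 2 = 0 then p'.getD (i / 2) 'A' else q'.getD (i / 2) 'A') := by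
        have hl : (x :: p').length + (y :: q').length = p'.length + q'.length + 2 := by
          simp; omega
        rw [hl, pv_range_add_two, List.map_cons, List.map_cons, List.map_map]
        congr 1
        congr 1
        apply List.map_congr_left
        intro i _
        have hm : (i + 2) % 2 = i % 2 := by omega
        have hd : (i + 2) / 2 = i / 2 + 1 := by omega
        simp only [Function.comp_def, hm, hd, List.getD_cons_succ]
      rw [lhs1, htail, rhs1, List.append_assoc, ihp]

-- pyGetD at -1 is the last element (index length-1) of a nonempty list
theorem pv_pyGetD_neg_one (p : List Char) (hp : p ≠ []) :
    PySem.List.pyGetD p (-1) 'A' = p.getD (p.length - 1) 'A' := by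
  have hlen : 1 ≤ p.length := List.length_pos_iff.mpr hp
  simp [PySem.List.pyGetD, PySem.List.pyGet?, PySem.List.pyIdx?, List.getD, hlen]

-- ===== VERDICT (by name: the statement is the Claim_ definition above) =====
theorem desincripta_pares_impares_spec : Claim_equal_desincripta_pares_impares := by
  intro s _
  unfold Spec_desincripta_pares_impares desincripta_pares_impares desincripta_pares_impares_alt
  set l := s.toList with hl
  set n := l.length with hn
  -- A's metade equals B's (n+1)/2 in both parity branches
  have hm2 : PySem.Int.mod (n : Int) 2 = ((n % 2 : ℕ) : Int) := by
    exact_mod_cast PySem.Int.mod_natCast n 2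
  have hf2 : PySem.Int.floordiv (n : Int) 2 = ((n / 2 : ℕ) : Int) := by
    exact_mod_cast PySem.Int.floordiv_natCast n 2
  have hlen : PySem.Str.len s = (n : Int) := by simp [PySem.Str.len_eq, hn, hl]
  have hmet : (if PySem.Int.mod (PySem.Str.len s) 2 = 0 then PySem.Int.floordiv (PySem.Str.len s) 2
      else PySem.Int.floordiv (PySem.Str.len s) 2 + 1) = (((n + 1) / 2 : ℕ) : Int) := by
    rw [hlen, hm2, hf2]
    by_cases h : n % 2 = 0
    · simp only [h, Nat.cast_zero, if_pos]
      have : n / 2 = (n + 1) / 2 := by omega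
      rw [this]
    · have h1 : ((n % 2 : ℕ) : Int) ≠ 0 := by
        simp only [ne_eq, Nat.cast_eq_zero]; omega
      rw [if_neg h1]
      push_cast
      omega
  simp only []
  rw [hmet]
  rw [hlen, hm2]
  set m : ℕ := (n + 1) / 2 with hm
  have hmn : m ≤ n := by omega
  have hpares : PySem.List.slice l (some ((m : ℕ) : Int)) none = l.drop m := by
    exact PySem.List.slice_from_natCast l m
  have hsl1 : PySem.List.slice l (some 0) (some ((m : ℕ) : Int)) = l.take m := by
    rw [PySem.List.slice_zero_start, PySem.List.slice_to_natCast]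
  have hsl2 : PySem.List.slice l (some ((m : ℕ) : Int)) (some ((n : ℕ) : Int)) = l.drop m := by
    rw [PySem.List.slice_natCast]
    exact List.take_of_length_le (by simp [hn])
  rw [hsl1, hsl2]
  set p := l.take m with hp
  set q := l.drop m with hqd
  have hpl : p.length = m := by simp [hp, hn.symm ▸ hmn]
  have hql : q.length = n - m := by simp [hqd, hn]
  have hq : p.length = q.length ∨ p.length = q.length + 1 := by
    rw [hpl, hql]; omega
  -- A's loop as a flatMap over Nat range
  rw [hql, PySem.List.foldl_append_eq_flatMap, List.nil_append]
  rw [show ((n - m : ℕ) : Int) = (((n - m : ℕ) : ℕ) : Int) from rfl, PySem.List.pyRange_zero_nat]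
  rw [List.flatMap_map]
  simp only [PySem.List.pyGetD_natCast]
  -- the odd tail
  have hmain := pv_main p q hq
  rw [hql, hpl] at hmain
  by_cases hodd : n % 2 = 0
  · have hcond : ¬ ((n % 2 : ℕ) : Int) ≠ 0 := by simp [hodd]
    rw [if_neg hcond]
    have hnt : ¬ (m = n - m + 1) := by omega
    rw [if_neg hnt, List.append_nil] at hmain
    rw [hmain]
    have hpq : m + (n - m) = n := by omega
    rw [hpq, hn]
  · have hcond : ((n % 2 : ℕ) : Int) ≠ 0 := by
      simp only [ne_eq, Nat.cast_eq_zero]; omega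
    rw [if_pos hcond]
    have hne : p ≠ [] := by
      intro hcon
      have := congrArg List.length hcon
      rw [hpl] at this
      simp at this
      omega
    rw [pv_pyGetD_neg_one p hne, hpl]
    have ht : m = n - m + 1 := by omega
    rw [if_pos ht] at hmain
    rw [hmain]
    have hpq : m + (n - m) = n := by omega
    rw [hpq, hn]
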